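-- pv_equiv track=rewrite | github.com/colinpt/rackoDiscordBot | racko_functions.py | check_spots
-- ===== SOURCE A (Python) =====
-- def check_spots(hand):
--     spots = []
--     spots_count = 10
--     spots_index = 0
--     for i in range(0,len(hand) - 1):
--         if hand[i] < hand[i+1]:
--             spots.append(1)
--             spots_count -= 1
--             spots_index = i
--         else:
--             spots.append(0)
--     spots.append(spots_count)
--     spots.append(spots_index)
--     return spots
-- ===== SOURCE B (Python) =====
-- def check_spots(hand):
--     flags = [1 if a < b else 0 for a, b in zip(hand, hand[1:])]
--     spots_index = 0
--     for i in range(len(flags) - 1, -1, -1):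
--         if flags[i] == 1:
--             spots_index = i
--             break
--     return flags + [10 - sum(flags), spots_index]
-- ===== Notes on version B (the rewrite author's own statement) =====
-- stated objective: simpler
-- what changed: Replaces the single index loop with running state (count, last index) by a zip-pairs comprehension for the flags, a separate sum for the count, and a reverse scan with break for the last increase index.
import Mathlib
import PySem

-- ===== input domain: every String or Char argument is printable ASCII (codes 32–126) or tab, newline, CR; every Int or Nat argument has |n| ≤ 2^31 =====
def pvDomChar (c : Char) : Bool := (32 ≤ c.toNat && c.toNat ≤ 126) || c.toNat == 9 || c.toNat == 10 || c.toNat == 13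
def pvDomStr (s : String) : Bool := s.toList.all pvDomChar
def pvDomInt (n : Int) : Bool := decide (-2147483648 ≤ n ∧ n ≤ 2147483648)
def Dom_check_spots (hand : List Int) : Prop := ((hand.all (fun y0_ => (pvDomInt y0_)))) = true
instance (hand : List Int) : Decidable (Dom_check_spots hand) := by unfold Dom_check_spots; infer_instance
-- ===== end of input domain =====

-- B builds the adjacency flags by zipping the hand with its tail, then computes the
-- count and the last-increase index in separate passes (reverse scan with break);
-- objective: simpler decomposition, same O(n) cost.

-- ===== PORT A =====
-- single loop over range(0, len-1) carrying (spots, spots_count, spots_index)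
def check_spots (hand : List Int) : List Int :=
  let st := (PySem.List.pyRange 0 ((hand.length : Int) - 1) 1).foldl
    (fun (s : List Int × Int × Int) i =>
      if PySem.List.pyGetD hand i 0 < PySem.List.pyGetD hand (i + 1) 0 then
        (s.1 ++ [1], s.2.1 - 1, i)
      else
        (s.1 ++ [0], s.2.1, s.2.2)) ([], 10, 0)
  st.1 ++ [st.2.1, st.2.2]

-- ===== PORT B =====
-- reverse scan 'for i in range(len(flags)-1, -1, -1): if flags[i]==1: spots_index=i; break'
def pvLastOne (flags : List Int) : Nat → Int
  | 0 => 0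
  | k + 1 => if flags.getD k 0 = 1 then (k : Int) else pvLastOne flags k

def check_spots_alt (hand : List Int) : List Int :=
  let flags := List.zipWith (fun a b => if a < b then (1 : Int) else 0) hand hand.tail
  flags ++ [10 - flags.sum, pvLastOne flags flags.length]

-- ===== PRECONDITION & SPEC =====
def Spec_check_spots (hand : List Int) (out : List Int) : Prop := out = check_spots_alt hand
instance (hand : List Int) (out : List Int) : Decidable (Spec_check_spots hand out) := by unfold Spec_check_spots; infer_instance

-- ===== CLAIM (what is proved, stated in full; the proofs are below) =====
def Claim_equal_check_spots : Prop := ∀ (hand : List Int), Dom_check_spots hand → Spec_check_spots hand (check_spots hand)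

-- ===== LEMMAS AND PROOFS =====

def pvFlags (hand : List Int) : List Int :=
  List.zipWith (fun a b => if a < b then (1 : Int) else 0) hand hand.tail

theorem pv_flags_length (hand : List Int) :
    (pvFlags hand).length = ((hand.length : Int) - 1).toNat := by
  cases hand with
  | nil => simp [pvFlags]
  | cons x xs => simp [pvFlags, List.length_zipWith]

theorem pv_loop_invariant (hand : List Int) (m : Nat) (hm : m ≤ (pvFlags hand).length) :
    ((List.range m).map (fun k : Nat => (0 : Int) + (k : Int))).foldl
      (fun (s : List Int × Int × Int) i =>
        if PySem.List.pyGetD hand i 0 < PySem.List.pyGetD hand (i + 1) 0 then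
          (s.1 ++ [1], s.2.1 - 1, i)
        else
          (s.1 ++ [0], s.2.1, s.2.2)) ([], 10, 0)
    = ((pvFlags hand).take m, 10 - ((pvFlags hand).take m).sum, pvLastOne (pvFlags hand) m) := by
  induction m with
  | zero => simp [pvLastOne]
  | succ k ih =>
    have hk : k < (pvFlags hand).length := Nat.lt_of_lt_of_le (Nat.lt_succ_self k) hm
    have hlen := pv_flags_length hand
    have hkl : k < hand.length := by omega
    have hk1 : k + 1 < hand.length := by omega
    have hget : ∀ (j : Nat) (hj : j < hand.length),
        PySem.List.pyGetD hand ((0 : Int) + (j : Int)) 0 = hand[j]'hj := by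
      intro j hj
      rw [zero_add, PySem.List.pyGetD_natCast, List.getD_eq_getElem?_getD,
        List.getElem?_eq_getElem hj, Option.getD_some]
    have hflag : (pvFlags hand)[k]'hk
        = if hand[k]'hkl < hand[k+1]'hk1 then (1 : Int) else 0 := by
      simp [pvFlags, List.getElem_zipWith, List.getElem_tail]
    have hcast : (0 : Int) + (k : Int) + 1 = (0 : Int) + ((k + 1 : Nat) : Int) := by
      push_cast; ring
    have htake : (pvFlags hand).take (k + 1) = (pvFlags hand).take k ++ [(pvFlags hand)[k]'hk] := by
      rw [List.take_add_one, List.getElem?_eq_getElem hk]; rfl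
    have hgetD : (pvFlags hand).getD k 0 = (pvFlags hand)[k]'hk := by
      rw [List.getD_eq_getElem?_getD, List.getElem?_eq_getElem hk, Option.getD_some]
    rw [List.range_succ, List.map_append, List.foldl_append, ih (Nat.le_of_succ_le hm)]
    simp only [List.map_cons, List.map_nil, List.foldl_cons, List.foldl_nil]
    rw [hcast, hget k hkl, hget (k+1) hk1]
    simp only [pvLastOne, hgetD, hflag, htake]
    by_cases hc : hand[k]'hkl < hand[k+1]'hk1
    · simp [hc]; ring
    · simp [hc]

theorem check_spots_eq_alt (hand : List Int) : check_spots hand = check_spots_alt hand := by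
  show _ = (pvFlags hand) ++ [10 - (pvFlags hand).sum, pvLastOne (pvFlags hand) (pvFlags hand).length]
  unfold check_spots
  rw [PySem.List.pyRange_one]
  simp only [Int.sub_zero]
  rw [pv_loop_invariant hand ((hand.length : Int) - 1).toNat (le_of_eq (pv_flags_length hand).symm)]
  rw [← pv_flags_length hand, List.take_length]

-- ===== VERDICT (by name: the statement is the Claim_ definition above) =====
theorem check_spots_spec : Claim_equal_check_spots := by
  intro hand _
  unfold Spec_check_spots
  exact check_spots_eq_alt hand
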